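-- pv_equiv track=rewrite | github.com/A-stick-bug/Leetcode | 2260. Minimum Consecutive Cards to Pick Up.py | minimum_card
-- ===== SOURCE A (Python) =====
-- def minimum_card(cards):
--     passed = {}
--     min_len = float('inf')
--
--     for i, n in enumerate(cards):
--         if n in passed:
--             min_len = min(min_len,i - passed[n] + 1)
--         passed[n] = i
--
--     if min_len == float('inf'):
--         return -1
--     return min_len
-- ===== SOURCE B (Python) =====
-- def minimum_card(cards):
--     positions = {}
--     for i, n in enumerate(cards):
--         positions.setdefault(n, []).append(i)
--     best = float('inf')
--     for pos in positions.values():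
--         for a, b in zip(pos, pos[1:]):
--             best = min(best, b - a + 1)
--     return -1 if best == float('inf') else best
-- ===== Notes on version B (the rewrite author's own statement) =====
-- stated objective: alternative
-- what changed: Replaces the single pass that tracks each value's last index and updates a running minimum inline with a two-phase algorithm: first group all indices per value into lists, then scan each list's consecutive pairs for the minimal gap.
import Mathlib
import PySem

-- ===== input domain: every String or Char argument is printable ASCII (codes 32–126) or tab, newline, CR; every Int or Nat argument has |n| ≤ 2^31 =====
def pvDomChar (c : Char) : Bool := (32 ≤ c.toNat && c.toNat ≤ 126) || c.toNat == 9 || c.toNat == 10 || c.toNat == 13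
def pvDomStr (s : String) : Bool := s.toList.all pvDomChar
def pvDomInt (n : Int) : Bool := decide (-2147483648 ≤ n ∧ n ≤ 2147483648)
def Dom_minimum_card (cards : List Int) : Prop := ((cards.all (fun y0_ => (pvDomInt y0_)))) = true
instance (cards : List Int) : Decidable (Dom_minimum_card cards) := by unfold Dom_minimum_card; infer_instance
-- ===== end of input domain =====

-- B groups all indices per value first and then scans each list's consecutive pairs,
-- instead of A's inline last-index tracking; same cost, different decomposition.

-- shared helper: Python's `min(m, v)` where m may still be float('inf') (= none)
def pvMinO (m : Option Int) (v : Int) : Option Int :=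
  match m with
  | none => some v
  | some a => some (min a v)

-- ===== PORT A =====
-- loop body of A at (i, n): update (min_len, passed)
def pvStepA (st : Option Int × PySem.Dict Int Int) (p : Int × Int) :
    Option Int × PySem.Dict Int Int :=
  let ml := match st.2.get? p.2 with
    | some j => pvMinO st.1 (p.1 - j + 1)
    | none => st.1
  (ml, st.2.insert p.2 p.1)

def minimum_card (cards : List Int) : Int :=
  match ((PySem.List.enumerate cards 0).foldl pvStepA (none, PySem.Dict.empty)).1 with
  | none => -1
  | some m => m

-- ===== PORT B =====
-- positions.setdefault(n, []).append(i)
def pvGroupStep (d : PySem.Dict Int (List Int)) (p : Int × Int) : PySem.Dict Int (List Int) :=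
  d.modify p.2 [] (· ++ [p.1])

-- inner loop of B: fold the gaps of one position list into the running best
def pvInner (acc : Option Int) (pos : List Int) : Option Int :=
  (pos.zip pos.tail).foldl (fun a q => pvMinO a (q.2 - q.1 + 1)) acc

def minimum_card_alt (cards : List Int) : Int :=
  match ((PySem.List.enumerate cards 0).foldl pvGroupStep PySem.Dict.empty).values.foldl
      pvInner none with
  | none => -1
  | some m => m

-- ===== PRECONDITION & SPEC =====
def Spec_minimum_card (cards : List Int) (out : Int) : Prop := out = minimum_card_alt cards
instance (cards : List Int) (out : Int) : Decidable (Spec_minimum_card cards out) := by unfold Spec_minimum_card; infer_instance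

-- ===== CLAIM (what is proved, stated in full; the proofs are below) =====
def Claim_equal_minimum_card : Prop := ∀ (cards : List Int), Dom_minimum_card cards → Spec_minimum_card cards (minimum_card cards)

-- ===== LEMMAS AND PROOFS =====

-- occurrence indices of value n in the pair list l
def pvOcc (l : List (Int × Int)) (n : Int) : List Int :=
  (l.filter (fun p => p.2 == n)).map (·.1)

theorem pvMinO_comm (a : Option Int) (u v : Int) :
    pvMinO (pvMinO a u) v = pvMinO (pvMinO a v) u := by
  cases a <;> simp [pvMinO, min_assoc, min_comm u v]

theorem pvFoldl_minO {β : Type} (g : β → Int) (ps : List β) (a : Option Int) (v : Int) :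
    ps.foldl (fun a x => pvMinO a (g x)) (pvMinO a v)
      = pvMinO (ps.foldl (fun a x => pvMinO a (g x)) a) v := by
  induction ps generalizing a with
  | nil => rfl
  | cons x t ih =>
    simp only [List.foldl_cons]
    rw [pvMinO_comm a v (g x)]
    exact ih (pvMinO a (g x))

theorem pvInner_minO (pos : List Int) (a : Option Int) (v : Int) :
    pvInner (pvMinO a v) pos = pvMinO (pvInner a pos) v := by
  simpa [pvInner] using pvFoldl_minO (fun q => q.2 - q.1 + 1) (pos.zip pos.tail) a v

theorem pvFoldlInner_minO (V : List (List Int)) (a : Option Int) (v : Int) :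
    V.foldl pvInner (pvMinO a v) = pvMinO (V.foldl pvInner a) v := by
  induction V generalizing a with
  | nil => rfl
  | cons pos t ih => simp [List.foldl_cons, pvInner_minO, ih]

theorem pvZipTail_snoc (ys : List Int) (y i : Int) :
    ((ys ++ [y]) ++ [i]).zip (((ys ++ [y]) ++ [i]).tail)
      = (ys ++ [y]).zip ((ys ++ [y]).tail) ++ [(y, i)] := by
  induction ys with
  | nil => rfl
  | cons x t ih =>
    cases t with
    | nil => rfl
    | cons b u => simpa using ih

theorem pvInner_snoc (a : Option Int) (ys : List Int) (y i : Int) :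
    pvInner a ((ys ++ [y]) ++ [i]) = pvMinO (pvInner a (ys ++ [y])) (i - y + 1) := by
  unfold pvInner
  rw [pvZipTail_snoc, List.foldl_append]
  rfl

-- inner over a single-element list adds no pair
theorem pvInner_single (a : Option Int) (i : Int) : pvInner a [i] = a := rfl

theorem pvOcc_snoc (l : List (Int × Int)) (p : Int × Int) (n : Int) :
    pvOcc (l ++ [p]) n = pvOcc l n ++ (if p.2 = n then [p.1] else []) := by
  by_cases h : p.2 = n <;> simp [pvOcc, List.filter_append, h]

-- the A-side dict maps n to the last index at which n occurred
theorem pvRunA_get? (l : List (Int × Int)) (n : Int) :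
    (l.foldl pvStepA (none, PySem.Dict.empty)).2.get? n = (pvOcc l n).getLast? := by
  induction l using List.reverseRecOn with
  | nil => simp [pvOcc, PySem.Dict.get?_empty]
  | append_singleton l p ih =>
    rw [List.foldl_append, List.foldl_cons, List.foldl_nil]
    by_cases h : n = p.2
    · simp [pvStepA, h, pvOcc_snoc, List.getLast?_append]
    · simp [pvStepA, PySem.Dict.get?_insert, h, pvOcc_snoc, Ne.symm h, ih]

-- the B-side dict maps n to all indices at which n occurred, in order
theorem pvGroups_getD (l : List (Int × Int)) (n : Int) :
    (l.foldl pvGroupStep PySem.Dict.empty).getD n [] = pvOcc l n := by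
  induction l using List.reverseRecOn with
  | nil => simp [pvOcc, PySem.Dict.getD_empty]
  | append_singleton l p ih =>
    rw [List.foldl_append, List.foldl_cons, List.foldl_nil]
    have hstep : (pvGroupStep (l.foldl pvGroupStep PySem.Dict.empty) p).getD n []
        = if n = p.2 then (l.foldl pvGroupStep PySem.Dict.empty).getD p.2 [] ++ [p.1]
          else (l.foldl pvGroupStep PySem.Dict.empty).getD n [] :=
      PySem.Dict.getD_modify _ p.2 n [] (· ++ [p.1])
    rw [hstep]
    by_cases h : n = p.2
    · subst h
      simp [ih, pvOcc_snoc]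
    · simp [h, pvOcc_snoc, Ne.symm h, ih]

theorem pvGroups_keys (l : List (Int × Int)) :
    (l.foldl pvGroupStep PySem.Dict.empty).keys = PySem.Set.ofList (l.map (·.2)) := by
  have h := PySem.Dict.keys_foldl_modify_key (κ := Int) (ν := List Int) l (·.2)
    ([] : List Int) (fun _ p v => v ++ [p.1]) PySem.Dict.empty
  simpa [pvGroupStep, PySem.Set.update_nil_left, PySem.Dict.keys_empty] using h

theorem pvGroups_nodup (l : List (Int × Int)) :
    (l.foldl pvGroupStep PySem.Dict.empty).keys.Nodup := by
  rw [pvGroups_keys]; exact PySem.Set.nodup_ofList _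

theorem pvGroups_mem_keys (l : List (Int × Int)) (n : Int) :
    n ∈ (l.foldl pvGroupStep PySem.Dict.empty).keys ↔ n ∈ l.map (·.2) := by
  rw [pvGroups_keys]; exact PySem.Set.mem_ofList _ _

theorem pvOcc_ne_nil_iff (l : List (Int × Int)) (n : Int) :
    pvOcc l n ≠ [] ↔ n ∈ l.map (·.2) := by
  simp [pvOcc, List.filter_eq_nil_iff]

-- replacing key n's list g n = ys ++ [y] by g n ++ [i] adds exactly the gap i - y + 1
theorem pvFold_map_update (K : List Int) (hK : K.Nodup) (n : Int) (hn : n ∈ K)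
    (g : Int → List Int) (ys : List Int) (y i : Int) (hg : g n = ys ++ [y]) (a : Option Int) :
    (K.map (fun k => if k = n then g n ++ [i] else g k)).foldl pvInner a
      = pvMinO ((K.map g).foldl pvInner a) (i - y + 1) := by
  induction K generalizing a with
  | nil => cases hn
  | cons k0 t ih =>
    rcases List.nodup_cons.mp hK with ⟨hk0, ht⟩
    by_cases h0 : k0 = n
    · subst h0
      have htn : ∀ k ∈ t, (if k = k0 then g k0 ++ [i] else g k) = g k := by
        intro k hk
        have : k ≠ k0 := fun h => hk0 (h ▸ hk)
        simp [this]
      simp only [List.map_cons, List.foldl_cons, ite_true,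
        List.map_congr_left htn]
      rw [hg, pvInner_snoc, ← hg, pvFoldlInner_minO]
    · have hn' : n ∈ t := by
        rcases List.mem_cons.mp hn with h | h
        · exact absurd h.symm h0
        · exact h
      simp only [List.map_cons, List.foldl_cons, if_neg h0]
      exact ih ht hn' (pvInner a (g k0))

-- effect on B's best of appending index i to key n's list
theorem pvBest_modify (d : PySem.Dict Int (List Int)) (hnd : d.keys.Nodup)
    (hiff : ∀ k, k ∈ d.keys ↔ d.getD k [] ≠ []) (n i : Int) :
    (d.modify n [] (· ++ [i])).values.foldl pvInner none
      = (match (d.getD n []).getLast? with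
          | some y => pvMinO (d.values.foldl pvInner none) (i - y + 1)
          | none => d.values.foldl pvInner none) := by
  have hgd : ∀ k, (d.modify n [] (· ++ [i])).getD k [] =
      if k = n then d.getD n [] ++ [i] else d.getD k [] := fun k =>
    PySem.Dict.getD_modify d n k [] (· ++ [i])
  by_cases hc : n ∈ d.keys
  · have hne : d.getD n [] ≠ [] := (hiff n).1 hc
    rcases (List.eq_nil_or_concat (d.getD n [])).resolve_left hne with ⟨ys, y, hys⟩
    rw [List.concat_eq_append] at hys
    have hlast : (d.getD n []).getLast? = some y := by simp [hys]
    have hkeys : (d.modify n [] (· ++ [i])).keys = d.keys := by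
      rw [PySem.Dict.keys_modify]
      exact PySem.Dict.keys_insert_of_contains d _ ((PySem.Dict.contains_iff_mem_keys d n).2 hc)
    have hv' := PySem.Dict.values_eq_map_keys (d.modify n [] (· ++ [i]))
      (hkeys ▸ hnd) ([] : List Int)
    have hv := PySem.Dict.values_eq_map_keys d hnd ([] : List Int)
    rw [hv', hkeys, hv, hlast]
    rw [List.map_congr_left (fun k (_ : k ∈ d.keys) => hgd k)]
    exact pvFold_map_update d.keys hnd n hc (fun k => d.getD k []) ys y i hys none
  · have hge : d.getD n [] = [] := by
      by_contra h; exact hc ((hiff n).2 h)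
    have hcf : d.contains n = false := by
      cases hcb : d.contains n
      · rfl
      · exact absurd ((PySem.Dict.contains_iff_mem_keys d n).1 hcb) hc
    have hkeys : (d.modify n [] (· ++ [i])).keys = d.keys ++ [n] := by
      rw [PySem.Dict.keys_modify]
      exact PySem.Dict.keys_insert_of_not_contains d _ hcf
    have hnd' : (d.modify n [] (· ++ [i])).keys.Nodup := by
      rw [hkeys, List.nodup_append]
      refine ⟨hnd, List.nodup_singleton n, ?_⟩
      intro a ha b hb
      rw [List.mem_singleton] at hb
      subst hb
      exact fun h => hc (h ▸ ha)
    have hv' := PySem.Dict.values_eq_map_keys (d.modify n [] (· ++ [i])) hnd' ([] : List Int)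
    have hv := PySem.Dict.values_eq_map_keys d hnd ([] : List Int)
    have hmap : d.keys.map (fun k => (d.modify n [] (· ++ [i])).getD k [])
        = d.keys.map (fun k => d.getD k []) :=
      List.map_congr_left (fun k hk => by
        have hkn : k ≠ n := fun h => hc (h ▸ hk)
        rw [hgd k, if_neg hkn])
    have hfn : (d.modify n [] (· ++ [i])).getD n [] = [i] := by
      rw [hgd n, if_pos rfl, hge]; rfl
    rw [hv', hkeys, List.map_append, hmap, List.map_singleton, hfn, hge,
      List.getLast?_nil, List.foldl_append, List.foldl_cons, List.foldl_nil,
      pvInner_single, hv]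

-- the crux: B's double fold over the grouped dict equals A's running minimum
theorem pvMain (l : List (Int × Int)) :
    (l.foldl pvStepA (none, PySem.Dict.empty)).1
      = ((l.foldl pvGroupStep PySem.Dict.empty).values.foldl pvInner none) := by
  induction l using List.reverseRecOn with
  | nil => rfl
  | append_singleton l p ih =>
    rw [List.foldl_append, List.foldl_cons, List.foldl_nil,
        List.foldl_append, List.foldl_cons, List.foldl_nil]
    have hbm : (pvGroupStep (l.foldl pvGroupStep PySem.Dict.empty) p).values.foldl pvInner none
        = (match ((l.foldl pvGroupStep PySem.Dict.empty).getD p.2 []).getLast? with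
            | some y =>
              pvMinO ((l.foldl pvGroupStep PySem.Dict.empty).values.foldl pvInner none)
                (p.1 - y + 1)
            | none => (l.foldl pvGroupStep PySem.Dict.empty).values.foldl pvInner none) :=
      pvBest_modify (l.foldl pvGroupStep PySem.Dict.empty) (pvGroups_nodup l)
        (fun k => by rw [pvGroups_getD, pvGroups_mem_keys]; exact (pvOcc_ne_nil_iff l k).symm)
        p.2 p.1
    show (match (l.foldl pvStepA (none, PySem.Dict.empty)).2.get? p.2 with
      | some j => pvMinO (l.foldl pvStepA (none, PySem.Dict.empty)).1 (p.1 - j + 1)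
      | none => (l.foldl pvStepA (none, PySem.Dict.empty)).1) = _
    rw [pvRunA_get?, ih, hbm, pvGroups_getD]

-- ===== VERDICT (by name: the statement is the Claim_ definition above) =====
theorem minimum_card_spec : Claim_equal_minimum_card := by
  intro cards _
  unfold Spec_minimum_card minimum_card minimum_card_alt
  rw [pvMain (PySem.List.enumerate cards 0)]
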